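-- pv_equiv track=rewrite | github.com/mnghiap/oa-practice | rice_bags.py | max_set_size
-- ===== SOURCE A (Python) =====
-- def bin_search(arr, x):
--     n = len(arr)
--     if n == 0:
--         return -1
--     if n == 1:
--         if arr[0] == x:
--             return 0
--         else:
--             return -1
--     else:
--         mid = arr[n//2]
--         if mid <= x:
--             idx = bin_search(arr[n//2:], x)
--             if idx == -1:
--                 return -1
--             else:
--                 return n//2 + idx
--         else:
--             return bin_search(arr[:n//2], x)
--
-- def max_set_size(rice_bags):
--     rice_bags.sort()
--     chains = []
--     while len(rice_bags) > 0:
--         x = rice_bags.pop(0)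
--         chains.append([x])
--         if len(rice_bags) == 0:
--             break
--         while True:
--             idx_next = bin_search(rice_bags, x*x)
--             if idx_next == -1:
--                 break
--             else:
--                 rice_bags.pop(idx_next)
--                 chains[-1].append(x*x)
--                 x = x*x
--     res = max(map(lambda x: len(x), chains))
--     return res
-- ===== SOURCE B (Python) =====
-- def max_set_size(rice_bags):
--     cnt = {}
--     for v in rice_bags:
--         cnt[v] = cnt.get(v, 0) + 1
--     best = 0
--     for v in sorted(cnt):
--         c = cnt[v]
--         if c == 0:
--             continue
--         cnt[v] = 0
--         if v == 0 or v == 1: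
--             cand = c
--         elif v == -1:
--             cand = 1 + cnt.get(1, 0)
--             cnt[1] = 0
--         else:
--             # bulk-consume along the square path v^2, v^4, ...:
--             # the i-th greedy chain from v takes one from a prefix of the path,
--             # so the total taken at each position is the running minimum of the
--             # counts (capped at c), and the longest chain is the first one.
--             m = c
--             u = v * v
--             cand = 1
--             while m > 0 and cnt.get(u, 0) > 0:
--                 t = cnt[u]
--                 if t < m:
--                     m = t
--                 cnt[u] = t - m
--                 cand += 1
--                 u = u * u
--         if cand > best:
--             best = cand
--     return best
-- ===== Notes on version B (the rewrite author's own statement) =====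
-- stated objective: faster
-- what changed: B replaces A's per-element greedy simulation (repeated pop(0), recursive-slicing binary search and one-by-one chain chasing) by one bulk pass per distinct value: a counting dict is built once, the counts of 0/1/-1 chains are read off in closed form, and for every other value a single walk down its square path consumes the running minimum of the counts in bulk, the first chain's length being 1 + the leading-positive run.
import Mathlib
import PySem

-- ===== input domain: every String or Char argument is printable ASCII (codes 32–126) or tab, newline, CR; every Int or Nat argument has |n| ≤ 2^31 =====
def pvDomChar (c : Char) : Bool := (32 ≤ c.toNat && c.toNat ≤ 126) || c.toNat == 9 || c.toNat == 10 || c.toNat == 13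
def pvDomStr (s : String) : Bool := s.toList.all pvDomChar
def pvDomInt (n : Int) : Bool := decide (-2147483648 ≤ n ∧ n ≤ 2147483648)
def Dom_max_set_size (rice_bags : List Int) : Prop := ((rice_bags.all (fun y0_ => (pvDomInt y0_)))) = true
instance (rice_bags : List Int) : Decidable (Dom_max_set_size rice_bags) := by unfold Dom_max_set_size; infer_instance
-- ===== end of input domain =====

-- B replaces A's greedy pop/binary-search simulation by one bulk running-min walk per distinct value
-- (faster); equivalence is about the RETURN value only (Python A sorts and empties its argument list
-- in place, B leaves it untouched).

-- ===== PORT A =====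
def bin_search (arr : List Int) (x : Int) : Int :=
  if arr.length = 0 then -1
  else if arr.length = 1 then
    (if arr.getD 0 0 = x then 0 else -1)      -- arr[0]; in range since len = 1
  else
    let m := arr.length / 2                   -- n // 2 on a Nat length: exact
    let mid := arr.getD m 0                   -- arr[n//2]; in range since m < n
    if mid ≤ x then
      let idx := bin_search (arr.drop m) x    -- arr[n//2:]
      if idx = -1 then -1 else (m : Int) + idx
    else
      bin_search (arr.take m) x               -- arr[:n//2]
termination_by arr.length
decreasing_by
  · simp only [List.length_drop]; omega
  · simp only [List.length_take]; omega

-- the inner 'while True' loop of A: state = (x, remaining rice_bags, chains[-1])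
def msInner (x : Int) (bags : List Int) (chain : List Int) : List Int × List Int :=
  let idx := bin_search bags (x * x)
  if idx = -1 then (bags, chain)
  else
    match h : PySem.List.pop? bags idx with
    | none => (bags, chain)                   -- unreachable: bin_search returns an in-range index
    | some r => msInner (x * x) r.2 (chain ++ [x * x])
termination_by bags.length
decreasing_by
  have := PySem.List.length_of_pop?_eq_some bags h
  omega

theorem msInner_eq_stop (x : Int) (bags chain : List Int)
    (h : bin_search bags (x*x) = -1) : msInner x bags chain = (bags, chain) := by
  rw [msInner]; simp only [if_pos h]

theorem msInner_eq_none (x : Int) (bags chain : List Int)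
    (h : ¬ bin_search bags (x*x) = -1)
    (hp : PySem.List.pop? bags (bin_search bags (x*x)) = none) :
    msInner x bags chain = (bags, chain) := by
  rw [msInner]; simp only [if_neg h]; split <;> simp_all

theorem msInner_eq_step (x : Int) (bags chain : List Int) (r : Int × List Int)
    (h : ¬ bin_search bags (x*x) = -1)
    (hp : PySem.List.pop? bags (bin_search bags (x*x)) = some r) :
    msInner x bags chain = msInner (x*x) r.2 (chain ++ [x*x]) := by
  rw [msInner]; simp only [if_neg h]; split <;> simp_all

theorem msInner_length_le (x : Int) (bags : List Int) (chain : List Int) :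
    (msInner x bags chain).1.length ≤ bags.length := by
  induction x, bags, chain using msInner.induct with
  | case1 x bags chain _idx h => rw [msInner_eq_stop x bags chain h]
  | case2 x bags chain _idx h hp => rw [msInner_eq_none x bags chain h hp]
  | case3 x bags chain _idx h r hp ih =>
    rw [msInner_eq_step x bags chain r h hp]
    have := PySem.List.length_of_pop?_eq_some bags hp
    omega

-- the outer 'while len(rice_bags) > 0' loop: pops the front, appends a new chain, runs the inner loop
def msOuter (bags : List Int) (chains : List (List Int)) : List (List Int) :=
  match bags with
  | [] => chains
  | x :: rest =>
    let chains2 := chains ++ [[x]]            -- chains.append([x]) after x = rice_bags.pop(0)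
    if rest.length = 0 then chains2           -- 'if len(rice_bags) == 0: break'
    else
      let r := msInner x rest [x]             -- inner loop mutating rice_bags and chains[-1]
      msOuter r.1 (chains2.dropLast ++ [r.2])
termination_by bags.length
decreasing_by
  have := msInner_length_le x rest [x]
  simp only [List.length_cons]
  omega

def max_set_size (rice_bags : List Int) : Int :=
  let bags := PySem.List.sorted rice_bags (fun y => y) false   -- rice_bags.sort()
  let chains := msOuter bags []
  -- res = max(map(len, chains)); Python's max raises ValueError on empty, excluded by Pre_
  (PySem.List.max? (chains.map (fun c => (c.length : Int))) (fun y => y)).getD 0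

-- ===== PORT B =====
-- termination measure for the count-decrementing loop: total stored count over the distinct keys
def dweight (d : PySem.Dict Int Int) : Nat :=
  (d.keys.dedup.map (fun k => (d.getD k 0).toNat)).sum

theorem sum_map_lt_of_ptwise (f g : Int → Nat) (u : Int) :
    ∀ (l : List Int), u ∈ l → l.Nodup →
    (∀ y ∈ l, y ≠ u → f y = g y) → f u < g u →
    (l.map f).sum < (l.map g).sum := by
  intro l
  induction l with
  | nil => intro hu; cases hu
  | cons a l ih =>
    intro hu hnd hpt hlt
    rcases List.mem_cons.mp hu with rfl | hul
    · have htl : l.map f = l.map g := by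
        apply List.map_congr_left
        intro y hy
        exact hpt y (List.mem_cons_of_mem _ hy)
          (fun hyu => (List.nodup_cons.mp hnd).1 (hyu ▸ hy))
      simp only [List.map_cons, List.sum_cons, htl]
      omega
    · have hau : a ≠ u := fun hau => (List.nodup_cons.mp hnd).1 (hau ▸ hul)
      have hha : f a = g a := hpt a List.mem_cons_self hau
      simp only [List.map_cons, List.sum_cons, hha]
      have := ih hul (List.nodup_cons.mp hnd).2
        (fun y hy hyu => hpt y (List.mem_cons_of_mem _ hy) hyu) hlt
      omega

theorem dweight_dec (d : PySem.Dict Int Int) (u w : Int) (h0 : 0 ≤ w)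
    (h : w < d.getD u 0) : dweight (d.insert u w) < dweight d := by
  have hcon : d.contains u = true := by
    by_contra hc
    rw [PySem.Dict.getD_of_not_contains d 0 (by simpa using hc)] at h
    omega
  unfold dweight
  rw [PySem.Dict.keys_insert_of_contains d _ hcon]
  apply sum_map_lt_of_ptwise _ _ u
  · exact List.mem_dedup.mpr ((PySem.Dict.contains_iff_mem_keys d u).mp hcon)
  · exact List.nodup_dedup _
  · intro y _ hyu
    rw [PySem.Dict.getD_insert d u y _ 0, if_neg hyu]
  · rw [PySem.Dict.getD_insert d u u _ 0, if_pos rfl]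
    omega

-- the inner 'while m > 0 and cnt.get(u, 0) > 0' walk of B: bulk-consumes the running minimum
def bWalk (d : PySem.Dict Int Int) (m u cand : Int) : PySem.Dict Int Int × Int :=
  if h : 0 < m ∧ 0 < d.getD u 0 then
    bWalk (d.insert u (d.getD u 0 - (if d.getD u 0 < m then d.getD u 0 else m)))
      (if d.getD u 0 < m then d.getD u 0 else m) (u * u) (cand + 1)
  else (d, cand)
termination_by dweight d
decreasing_by
  obtain ⟨hm, ht⟩ := h
  refine dweight_dec d u _ ?_ ?_ <;> split <;> omega

-- the body of B's 'for v in sorted(cnt)' loop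
def bagStep (cnt : PySem.Dict Int Int) (v best : Int) : PySem.Dict Int Int × Int :=
  let c := cnt.getD v 0                       -- cnt[v]; v is a key of cnt
  if c = 0 then (cnt, best)                   -- 'continue'
  else
    let cnt1 := cnt.insert v 0                -- cnt[v] = 0
    if v = 0 ∨ v = 1 then
      (cnt1, if best < c then c else best)
    else if v = -1 then
      let cand := 1 + cnt1.getD 1 0
      (cnt1.insert 1 0, if best < cand then cand else best)
    else
      let r := bWalk cnt1 c (v * v) 1
      (r.1, if best < r.2 then r.2 else best)

def max_set_size_alt (rice_bags : List Int) : Int :=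
  let cnt := rice_bags.foldl (fun d v => d.insert v (d.getD v 0 + 1)) PySem.Dict.empty
  ((PySem.List.sorted cnt.keys (fun y => y) false).foldl
      (fun s v => bagStep s.1 v s.2) (cnt, (0 : Int))).2

-- ===== PRECONDITION & SPEC =====
-- Pre_ excludes only the empty list, on which Python A raises ValueError (max of an empty sequence).
def Pre_max_set_size (rice_bags : List Int) : Prop := rice_bags ≠ []
instance (rice_bags : List Int) : Decidable (Pre_max_set_size rice_bags) := by
  unfold Pre_max_set_size; infer_instance
def pvWitness_max_set_size : List Int := [2, 4, 16, 3, 4]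

def Spec_max_set_size (rice_bags : List Int) (out : Int) : Prop := out = max_set_size_alt rice_bags
instance (rice_bags : List Int) (out : Int) : Decidable (Spec_max_set_size rice_bags out) := by
  unfold Spec_max_set_size; infer_instance

-- ===== CLAIM (what is proved, stated in full; the proofs are below) =====
def Claim_equal_max_set_size : Prop := ∀ (rice_bags : List Int), Dom_max_set_size rice_bags → Pre_max_set_size rice_bags → Spec_max_set_size rice_bags (max_set_size rice_bags)

-- ===== LEMMAS AND PROOFS =====

-- correctness of A's hand-written binary search on a sorted list
theorem bs_spec (x : Int) : ∀ (arr : List Int), arr.Pairwise (· ≤ ·) →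
    (x ∉ arr ∧ bin_search arr x = -1) ∨
    (∃ i : Nat, ∃ hi : i < arr.length, arr[i] = x ∧ bin_search arr x = (i : Int)) := by
  intro arr
  induction arr using bin_search.induct (x := x) with
  | case1 arr h0 =>
    intro _
    left
    have : arr = [] := List.length_eq_zero_iff.mp h0
    subst this
    exact ⟨List.not_mem_nil, by rw [bin_search]; simp⟩
  | case2 arr h0 h1 heq =>
    intro _
    right
    refine ⟨0, by omega, ?_, by rw [bin_search]; simp only [if_neg h0, if_pos h1, if_pos heq]; norm_num⟩
    rw [← List.getD_eq_getElem arr 0 (by omega)]; exact heq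
  | case3 arr h0 h1 hne =>
    intro _
    left
    constructor
    · intro hx
      rcases List.mem_iff_getElem.mp hx with ⟨j, hj, hjx⟩
      have hj0 : j = 0 := by omega
      subst hj0
      exact hne (by rw [List.getD_eq_getElem arr 0 (by omega)]; exact hjx)
    · rw [bin_search]; simp only [if_neg h0, if_pos h1, if_neg hne]
  | case4 arr h0 h1 _m _mid hmidv _idx hidxv ih =>
    intro hs
    have hmid : arr.getD (arr.length / 2) 0 ≤ x := hmidv
    have hidx : bin_search (arr.drop (arr.length / 2)) x = -1 := hidxv
    have hm1 : 1 ≤ arr.length / 2 := by omega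
    have hmn : arr.length / 2 < arr.length := by omega
    have hmidE : arr.getD (arr.length / 2) 0 = arr[arr.length / 2] :=
      List.getD_eq_getElem arr 0 hmn
    have hsd : (arr.drop (arr.length / 2)).Pairwise (· ≤ ·) :=
      hs.sublist (List.drop_sublist _ _)
    rcases ih hsd with ⟨hnm, _⟩ | ⟨i, hi, hix, hbs⟩
    · left
      constructor
      · intro hx
        have hx' : x ∈ arr.take (arr.length / 2) ++ arr.drop (arr.length / 2) := by
          rw [List.take_append_drop]; exact hx
        rcases List.mem_append.mp hx' with hxt | hxd
        · rcases List.mem_take_iff_getElem.mp hxt with ⟨j, hj, hjx⟩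
          have hle : arr[j] ≤ arr[arr.length / 2] :=
            List.pairwise_iff_getElem.mp hs j (arr.length / 2) (by omega) hmn (by omega)
          have hxm : arr[arr.length / 2] = x := by
            have h2 := hmid
            rw [hmidE] at h2
            rw [← hjx] at h2 ⊢
            omega
          apply hnm
          rw [← List.getElem_cons_drop hmn, hxm]
          exact List.mem_cons_self
        · exact hnm hxd
      · rw [bin_search]
        simp only [if_neg h0, if_neg h1,
          if_pos (show arr.getD (arr.length / 2) 0 ≤ x from hmid),
          if_pos (show bin_search (arr.drop (arr.length / 2)) x = -1 from hidx)]
    · exfalso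
      rw [hbs] at hidx
      omega
  | case5 arr h0 h1 _m _mid hmidv _idx hidxv ih =>
    intro hs
    have hmid : arr.getD (arr.length / 2) 0 ≤ x := hmidv
    have hidx : ¬ bin_search (arr.drop (arr.length / 2)) x = -1 := hidxv
    have hm1 : 1 ≤ arr.length / 2 := by omega
    have hmn : arr.length / 2 < arr.length := by omega
    have hsd : (arr.drop (arr.length / 2)).Pairwise (· ≤ ·) :=
      hs.sublist (List.drop_sublist _ _)
    rcases ih hsd with ⟨_, hbs⟩ | ⟨i, hi, hix, hbs⟩
    · exact absurd hbs hidx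
    · right
      have hi' : i < (arr.drop (arr.length / 2)).length := hi
      simp only [List.length_drop] at hi'
      refine ⟨arr.length / 2 + i, by omega, ?_, ?_⟩
      · rw [← List.getElem_drop (h := hi)]; exact hix
      · rw [bin_search]
        simp only [if_neg h0, if_neg h1,
          if_pos (show arr.getD (arr.length / 2) 0 ≤ x from hmid)]
        rw [show bin_search (arr.drop (arr.length / 2)) x = (i : Int) from hbs]
        rw [if_neg (by omega)]
        push_cast
        ring
  | case6 arr h0 h1 _m _mid hmidv ih =>
    intro hs
    have hmid : ¬ arr.getD (arr.length / 2) 0 ≤ x := hmidv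
    have hm1 : 1 ≤ arr.length / 2 := by omega
    have hmn : arr.length / 2 < arr.length := by omega
    have hmidE : arr.getD (arr.length / 2) 0 = arr[arr.length / 2] :=
      List.getD_eq_getElem arr 0 hmn
    have hst : (arr.take (arr.length / 2)).Pairwise (· ≤ ·) :=
      hs.sublist (List.take_sublist _ _)
    have hsd : (arr.drop (arr.length / 2)).Pairwise (· ≤ ·) :=
      hs.sublist (List.drop_sublist _ _)
    rcases ih hst with ⟨hnm, hbs⟩ | ⟨i, hi, hix, hbs⟩
    · left
      constructor
      · intro hx
        have hx' : x ∈ arr.take (arr.length / 2) ++ arr.drop (arr.length / 2) := by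
          rw [List.take_append_drop]; exact hx
        rcases List.mem_append.mp hx' with hxt | hxd
        · exact hnm hxt
        · have hdc : arr[arr.length / 2] :: arr.drop (arr.length / 2 + 1)
              = arr.drop (arr.length / 2) := List.getElem_cons_drop hmn
          rw [← hdc] at hxd
          have hmx : arr[arr.length / 2] ≤ x := by
            rcases List.mem_cons.mp hxd with hEq | hTl
            · omega
            · have hpc := (List.pairwise_cons.mp (by rw [hdc]; exact hsd)).1
              exact hpc x hTl
          exact hmid (by rw [hmidE]; exact hmx)
      · rw [bin_search]
        simp only [if_neg h0, if_neg h1,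
          if_neg (show ¬ arr.getD (arr.length / 2) 0 ≤ x from hmid)]
        exact hbs
    · right
      have hi' : i < (arr.take (arr.length / 2)).length := hi
      simp only [List.length_take] at hi'
      refine ⟨i, by omega, ?_, ?_⟩
      · rw [← List.getElem_take (h := hi)]; exact hix
      · rw [bin_search]
        simp only [if_neg h0, if_neg h1,
          if_neg (show ¬ arr.getD (arr.length / 2) 0 ≤ x from hmid)]
        exact hbs

theorem count_eraseIdx_int (xs : List Int) (i : Nat) (hi : i < xs.length) (y : Int) :
    ((xs.eraseIdx i).count y : Int) = (xs.count y : Int) - (if xs[i] = y then 1 else 0) := by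
  have h1 : xs.count y = ((xs.take i ++ [xs[i]]) ++ xs.drop (i+1)).count y := by
    rw [← List.take_succ_eq_append_getElem hi, List.take_append_drop]
  rw [List.eraseIdx_eq_take_drop_succ, h1]
  simp only [List.count_append, List.count_singleton]
  push_cast
  split <;> split <;> simp_all <;> omega

-- per-copy counter simulation of A's greedy (proof intermediary between the two ports)
def csChase (cnt : PySem.Dict Int Int) (u : Int) (length : Int) :
    PySem.Dict Int Int × Int :=
  if h : 0 < cnt.getD u 0 then
    csChase (cnt.insert u (cnt.getD u 0 - 1)) (u * u) (length + 1)
  else (cnt, length)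
termination_by dweight cnt
decreasing_by exact dweight_dec cnt u _ (by omega) (by omega)

theorem csChase_dweight_le (cnt : PySem.Dict Int Int) (u : Int) (length : Int) :
    dweight (csChase cnt u length).1 ≤ dweight cnt := by
  induction cnt, u, length using csChase.induct with
  | case1 cnt u length h ih =>
    rw [csChase]; simp only [h, dif_pos]
    exact le_of_lt (lt_of_le_of_lt ih (dweight_dec cnt u _ (by omega) (by omega)))
  | case2 cnt u length h => rw [csChase]; simp [h]

def csLoop (cnt : PySem.Dict Int Int) (v : Int) (best : Int) :
    PySem.Dict Int Int × Int :=
  if h : 0 < cnt.getD v 0 then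
    let cnt1 := cnt.insert v (cnt.getD v 0 - 1)
    let r := csChase cnt1 (v * v) 1
    csLoop r.1 v (if best < r.2 then r.2 else best)
  else (cnt, best)
termination_by dweight cnt
decreasing_by
  exact lt_of_le_of_lt (csChase_dweight_le _ _ _) (dweight_dec cnt v _ (by omega) (by omega))

theorem csChase_stop (cnt : PySem.Dict Int Int) (u L : Int) (h : ¬ 0 < cnt.getD u 0) :
    csChase cnt u L = (cnt, L) := by
  rw [csChase]; simp [h]

theorem csChase_step (cnt : PySem.Dict Int Int) (u L : Int) (h : 0 < cnt.getD u 0) :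
    csChase cnt u L = csChase (cnt.insert u (cnt.getD u 0 - 1)) (u * u) (L + 1) := by
  rw [csChase]; simp [h]

-- simulation of A's inner chase loop by the per-copy counter chase, through "counts match"
theorem inner_sim : ∀ (n : Nat) (bags : List Int) (cnt : PySem.Dict Int Int) (x L : Int)
    (chain : List Int), bags.length ≤ n →
    bags.Pairwise (· ≤ ·) →
    (∀ y, (bags.count y : Int) = cnt.getD y 0) →
    (msInner x bags chain).1.Pairwise (· ≤ ·) ∧
    (∀ y, (((msInner x bags chain).1.count y : Int) = (csChase cnt (x*x) L).1.getD y 0) ∧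
          (msInner x bags chain).1.count y ≤ bags.count y) ∧
    ((msInner x bags chain).2.length : Int) + L = (chain.length : Int) + (csChase cnt (x*x) L).2 := by
  intro n
  induction n with
  | zero =>
    intro bags cnt x L chain hn hs hc
    have hb : bags = [] := List.length_eq_zero_iff.mp (by omega)
    subst hb
    have hstopA : bin_search [] (x*x) = -1 := by rw [bin_search]; simp
    rw [msInner_eq_stop x [] chain hstopA]
    have hstopB : ¬ 0 < cnt.getD (x*x) 0 := by
      have := hc (x*x); simp at this; omega
    rw [csChase_stop cnt (x*x) L hstopB]
    exact ⟨List.Pairwise.nil, fun y => ⟨hc y, le_refl _⟩, by simp⟩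
  | succ n ih =>
    intro bags cnt x L chain hn hs hc
    rcases bs_spec (x*x) bags hs with ⟨hnm, hbs⟩ | ⟨i, hi, hix, hbs⟩
    · rw [msInner_eq_stop x bags chain hbs]
      have hcnt0 : bags.count (x*x) = 0 := List.count_eq_zero.mpr hnm
      have hstopB : ¬ 0 < cnt.getD (x*x) 0 := by
        have := hc (x*x); rw [hcnt0] at this; omega
      rw [csChase_stop cnt (x*x) L hstopB]
      exact ⟨hs, fun y => ⟨hc y, le_refl _⟩, by simp⟩
    · -- one element removed on each side
      have hne : ¬ bin_search bags (x*x) = -1 := by rw [hbs]; omega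
      have hpop : PySem.List.pop? bags (bin_search bags (x*x))
          = some (bags[i], bags.eraseIdx i) := by
        rw [hbs]; exact PySem.List.pop?_natCast bags i hi
      rw [msInner_eq_step x bags chain (bags[i], bags.eraseIdx i) hne hpop]
      have hmem : (x*x) ∈ bags := hix ▸ List.getElem_mem hi
      have hposB : 0 < cnt.getD (x*x) 0 := by
        have h1 := hc (x*x)
        have h2 : 0 < bags.count (x*x) := List.count_pos_iff.mpr hmem
        omega
      rw [csChase_step cnt (x*x) L hposB]
      have hcount : ∀ y, ((bags.eraseIdx i).count y : Int)
          = (cnt.insert (x*x) (cnt.getD (x*x) 0 - 1)).getD y 0 := by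
        intro y
        rw [count_eraseIdx_int bags i hi y, hix,
          PySem.Dict.getD_insert cnt (x*x) y _ 0]
        rcases eq_or_ne y (x*x) with rfl | hyne
        · rw [if_pos rfl, if_pos rfl, ← hc (x*x)]
        · rw [if_neg (Ne.symm hyne), if_neg hyne, ← hc y]
          omega
      have hlen : (bags.eraseIdx i).length ≤ n := by
        rw [List.length_eraseIdx_of_lt hi]; omega
      have hsrt : (bags.eraseIdx i).Pairwise (· ≤ ·) :=
        hs.sublist (List.eraseIdx_sublist bags i)
      have IH := ih (bags.eraseIdx i) (cnt.insert (x*x) (cnt.getD (x*x) 0 - 1))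
        (x*x) (L+1) (chain ++ [x*x]) hlen hsrt hcount
      refine ⟨IH.1, ?_, ?_⟩
      · intro y
        refine ⟨(IH.2.1 y).1, le_trans (IH.2.1 y).2 ?_⟩
        exact (List.eraseIdx_sublist bags i).count_le y
      · have := IH.2.2
        simp only [List.length_append, List.length_cons, List.length_nil] at this ⊢
        push_cast at this ⊢
        omega

theorem msOuter_append : ∀ (n : Nat) (bags : List Int) (c : List (List Int)),
    bags.length ≤ n → msOuter bags c = c ++ msOuter bags [] := by
  intro n
  induction n with
  | zero =>
    intro bags c hn
    have hb : bags = [] := List.length_eq_zero_iff.mp (by omega)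
    subst hb
    rw [msOuter, msOuter]; simp
  | succ n ih =>
    intro bags c hn
    cases bags with
    | nil => rw [msOuter, msOuter]; simp
    | cons x rest =>
      rw [msOuter, msOuter]
      by_cases hr : rest.length = 0
      · simp only [if_pos hr]; simp
      · simp only [if_neg hr]
        have hlen : (msInner x rest [x]).1.length ≤ n := by
          have := msInner_length_le x rest [x]
          simp only [List.length_cons] at hn
          omega
        rw [ih _ ((c ++ [[x]]).dropLast ++ [(msInner x rest [x]).2]) hlen,
            ih _ ((([] ++ [[x]] : List (List Int))).dropLast ++ [(msInner x rest [x]).2]) hlen]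
        simp

theorem max_getD_eq_foldl (l : List Int) (h : ∀ a ∈ l, 0 ≤ a) :
    (PySem.List.max? l (fun y => y)).getD 0 = l.foldl max 0 := by
  cases l with
  | nil =>
    rw [show (PySem.List.max? ([] : List Int) (fun y => y)) = none from
      (PySem.List.max?_eq_none_iff _ _).mpr rfl]
    rfl
  | cons c t =>
    rw [PySem.List.max?_id_cons]
    simp only [Option.getD_some, List.foldl_cons]
    rw [max_eq_right (h c List.mem_cons_self)]

theorem csLoop_stop (cnt : PySem.Dict Int Int) (v best : Int) (h : ¬ 0 < cnt.getD v 0) :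
    csLoop cnt v best = (cnt, best) := by
  rw [csLoop]; simp [h]

theorem csLoop_step (cnt : PySem.Dict Int Int) (v best : Int) (h : 0 < cnt.getD v 0) :
    csLoop cnt v best
      = csLoop (csChase (cnt.insert v (cnt.getD v 0 - 1)) (v * v) 1).1 v
          (if best < (csChase (cnt.insert v (cnt.getD v 0 - 1)) (v * v) 1).2
           then (csChase (cnt.insert v (cnt.getD v 0 - 1)) (v * v) 1).2 else best) := by
  rw [csLoop]; simp [h]

-- simulation of A's outer loop by the per-copy fold over the sorted distinct keys
theorem outer_sim : ∀ (n : Nat) (bags ks : List Int) (cnt : PySem.Dict Int Int) (best : Int),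
    bags.length + ks.length ≤ n →
    bags.Pairwise (· ≤ ·) →
    (∀ y, (bags.count y : Int) = cnt.getD y 0) →
    ks.Pairwise (· < ·) →
    (∀ y, 0 < cnt.getD y 0 → y ∈ ks) →
    ((msOuter bags []).map (fun c => (c.length : Int))).foldl max best
      = (ks.foldl (fun s v => csLoop s.1 v s.2) (cnt, best)).2 := by
  intro n
  induction n with
  | zero =>
    intro bags ks cnt best hn _ _ _ _
    have hb : bags = [] := List.length_eq_zero_iff.mp (by omega)
    have hk : ks = [] := List.length_eq_zero_iff.mp (by omega)
    subst hb; subst hk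
    rw [msOuter]; simp
  | succ n ih =>
    intro bags ks cnt best hn hs hc hks hpos
    cases bags with
    | nil =>
      cases ks with
      | nil => rw [msOuter]; simp
      | cons v ks' =>
        have hv : ¬ 0 < cnt.getD v 0 := by
          have := hc v; simp only [List.count_nil] at this; omega
        simp only [List.foldl_cons]
        rw [csLoop_stop cnt v best hv]
        exact ih [] ks' cnt best (by simp only [List.length_nil, List.length_cons] at hn ⊢; omega)
          hs hc (List.pairwise_cons.mp hks).2
          (fun y hy => by
            rcases List.mem_cons.mp (hpos y hy) with rfl | h'
            · exact absurd hy hv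
            · exact h')
    | cons b rest =>
      have hposb : 0 < cnt.getD b 0 := by
        have h1 := hc b
        have h2 : 0 < (b :: rest).count b := List.count_pos_iff.mpr List.mem_cons_self
        omega
      have hbk : b ∈ ks := hpos b hposb
      cases ks with
      | nil => cases hbk
      | cons v ks' =>
        by_cases hvpos : 0 < cnt.getD v 0
        · have hvb : v = b := by
            have hvmem : v ∈ (b :: rest) := by
              apply List.count_pos_iff.mp
              have := hc v; omega
            have hble : b ≤ v := by
              rcases List.mem_cons.mp hvmem with rfl | h'
              · exact le_refl _
              · exact (List.pairwise_cons.mp hs).1 v h'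
            rcases List.mem_cons.mp hbk with rfl | h'
            · rfl
            · exact absurd ((List.pairwise_cons.mp hks).1 b h') (by omega)
          subst hvb
          -- one decrement on B's side
          have hcnt1 : ∀ y, (rest.count y : Int)
              = (cnt.insert v (cnt.getD v 0 - 1)).getD y 0 := by
            intro y
            rw [PySem.Dict.getD_insert cnt v y _ 0]
            rcases eq_or_ne y v with rfl | hyne
            · have := hc y
              rw [List.count_cons_self] at this
              rw [if_pos rfl]
              push_cast at this ⊢
              omega
            · have := hc y
              rw [List.count_cons_of_ne (Ne.symm hyne)] at this
              rw [if_neg hyne]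
              exact this
          simp only [List.foldl_cons]
          rw [csLoop_step cnt v best hvpos]
          rw [msOuter]
          by_cases hr : rest.length = 0
          · -- last element popped: chain [v] of length 1, all counts now zero
            have hrest : rest = [] := List.length_eq_zero_iff.mp hr
            subst hrest
            have hzero : ∀ y, ¬ 0 < (cnt.insert v (cnt.getD v 0 - 1)).getD y 0 := by
              intro y
              have := hcnt1 y
              simp only [List.count_nil] at this
              omega
            rw [csChase_stop _ _ _ (hzero (v*v))]
            rw [csLoop_stop _ _ _ (hzero v)]
            rw [if_pos hr]
            have := ih [] ks' (cnt.insert v (cnt.getD v 0 - 1))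
              (if best < 1 then 1 else best)
              (by simp only [List.length_nil, List.length_cons] at hn ⊢; omega)
              List.Pairwise.nil
              (fun y => by simp only [List.count_nil]; have := hcnt1 y; simpa using this)
              (List.pairwise_cons.mp hks).2
              (fun y hy => absurd hy (hzero y))
            rw [msOuter] at this
            rw [← this]
            simp only [List.nil_append, List.map_cons, List.map_nil, List.foldl_cons,
              List.foldl_nil, List.length_cons, List.length_nil]
            rcases lt_or_ge best 1 with h1 | h1
            · rw [if_pos h1]; push_cast; omega
            · rw [if_neg (by omega)]; push_cast; omega
          · -- run the inner chase on both sides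
            simp only [if_neg hr]
            have hrs : rest.Pairwise (· ≤ ·) := (List.pairwise_cons.mp hs).2
            have IS := inner_sim rest.length rest (cnt.insert v (cnt.getD v 0 - 1))
              v 1 [v] (le_refl _) hrs hcnt1
            have hlenle := msInner_length_le v rest [v]
            -- name the two results
            set r := msInner v rest [v] with hrdef
            set r' := csChase (cnt.insert v (cnt.getD v 0 - 1)) (v*v) 1 with hr'def
            have hlen2 : (r.2.length : Int) = r'.2 := by
              have := IS.2.2
              simp only [List.length_cons, List.length_nil] at this
              push_cast at this ⊢
              omega
            simp only [List.nil_append,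
              show ([[v]] : List (List Int)).dropLast = [] from rfl]
            rw [msOuter_append rest.length r.1 [r.2] hlenle]
            simp only [List.nil_append, List.map_append,
              List.map_cons, List.map_nil, List.foldl_append, List.foldl_cons,
              List.foldl_nil]
            have hIH := ih r.1 (v :: ks') r'.1
              (if best < r'.2 then r'.2 else best)
              (by
                simp only [List.length_cons] at hn ⊢
                omega)
              IS.1
              (fun y => (IS.2.1 y).1)
              hks
              (fun y hy => by
                have h1 : 0 < r.1.count y := by
                  have := (IS.2.1 y).1; omega
                have h2 : 0 < rest.count y := lt_of_lt_of_le h1 ((IS.2.1 y).2)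
                have h3 : 0 < cnt.getD y 0 := by
                  have hcy := hc y
                  rcases eq_or_ne y v with rfl | hyne
                  · exact hvpos
                  · have := hcnt1 y
                    rw [PySem.Dict.getD_insert cnt v y _ 0, if_neg hyne] at this
                    omega
                exact hpos y h3)
            rw [List.foldl_cons] at hIH
            rw [← hIH]
            congr 1
            rw [← hlen2]
            rcases lt_or_ge best (r.2.length : Int) with h1 | h1
            · rw [if_pos h1]; omega
            · rw [if_neg (by omega)]; omega
        · simp only [List.foldl_cons]
          rw [csLoop_stop cnt v best hvpos]
          exact ih (b :: rest) ks' cnt best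
            (by simp only [List.length_cons] at hn ⊢; omega)
            hs hc (List.pairwise_cons.mp hks).2
            (fun y hy => by
              rcases List.mem_cons.mp (hpos y hy) with rfl | h'
              · exact absurd hy hvpos
              · exact h')

-- ===== bridge from the per-copy simulation to B's bulk walk =====

def DEq (d1 d2 : PySem.Dict Int Int) : Prop := ∀ y, d1.getD y 0 = d2.getD y 0

theorem sq_facts (u : Int) (h : 2 ≤ u) : u < u*u ∧ 2 ≤ u*u := by
  constructor <;> nlinarith

theorem bWalk_stop (d : PySem.Dict Int Int) (m u L : Int)
    (h : ¬ (0 < m ∧ 0 < d.getD u 0)) : bWalk d m u L = (d, L) := by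
  rw [bWalk]; simp [h]

theorem bWalk_step (d : PySem.Dict Int Int) (m u L : Int)
    (h : 0 < m ∧ 0 < d.getD u 0) :
    bWalk d m u L
      = bWalk (d.insert u (d.getD u 0 - (if d.getD u 0 < m then d.getD u 0 else m)))
          (if d.getD u 0 < m then d.getD u 0 else m) (u*u) (L+1) := by
  rw [bWalk]; simp [h]

theorem walk_congr (d1 : PySem.Dict Int Int) (m u L : Int) :
    ∀ (d2 : PySem.Dict Int Int), DEq d1 d2 →
    DEq (bWalk d1 m u L).1 (bWalk d2 m u L).1 ∧ (bWalk d1 m u L).2 = (bWalk d2 m u L).2 := by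
  induction d1, m, u, L using bWalk.induct with
  | case1 d1 m u L h ih =>
    intro d2 hde
    have hgu := hde u
    rw [bWalk_step d1 m u L h, bWalk_step d2 m u L (by rw [← hgu]; exact h), ← hgu]
    simp only [dite_eq_ite] at ih ⊢
    refine ih _ (fun y => ?_)
    rw [PySem.Dict.getD_insert, PySem.Dict.getD_insert]
    split
    · rfl
    · exact hde y
  | case2 d1 m u L h =>
    intro d2 hde
    have hgu := hde u
    rw [bWalk_stop d1 m u L h, bWalk_stop d2 m u L (by rw [← hgu]; exact h)]
    exact ⟨hde, rfl⟩


theorem walk_dict_L (d : PySem.Dict Int Int) (m u L L' : Int) :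
    (bWalk d m u L).1 = (bWalk d m u L').1 := by
  induction d, m, u, L using bWalk.induct generalizing L' with
  | case1 d m u L h ih =>
    rw [bWalk_step d m u L h, bWalk_step d m u L' h]
    simp only [dite_eq_ite] at ih
    exact ih (L' + 1)
  | case2 d m u L h =>
    rw [bWalk_stop d m u L h, bWalk_stop d m u L' h]


theorem walk_le_len (d : PySem.Dict Int Int) (m u L : Int) : L ≤ (bWalk d m u L).2 := by
  induction d, m, u, L using bWalk.induct with
  | case1 d m u L h ih =>
    rw [bWalk_step d m u L h]
    simp only [dite_eq_ite] at ih
    omega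
  | case2 d m u L h =>
    rw [bWalk_stop d m u L h]


theorem walk_getD_low (d : PySem.Dict Int Int) (m u L y : Int)
    (h2 : 2 ≤ u) (hy : y < u) : (bWalk d m u L).1.getD y 0 = d.getD y 0 := by
  induction d, m, u, L using bWalk.induct generalizing y with
  | case1 d m u L h ih =>
    rw [bWalk_step d m u L h]
    simp only [dite_eq_ite] at ih
    have hsq := sq_facts u h2
    rw [ih y hsq.2 (by omega), PySem.Dict.getD_insert, if_neg (by omega)]
  | case2 d m u L h =>
    rw [bWalk_stop d m u L h]


theorem walk_getD_le (d : PySem.Dict Int Int) (m u L y : Int) :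
    (bWalk d m u L).1.getD y 0 ≤ d.getD y 0 := by
  induction d, m, u, L using bWalk.induct generalizing y with
  | case1 d m u L h ih =>
    rw [bWalk_step d m u L h]
    simp only [dite_eq_ite] at ih
    refine le_trans (ih y) ?_
    rw [PySem.Dict.getD_insert]
    split
    · subst y; split <;> omega
    · exact le_refl _
  | case2 d m u L h =>
    rw [bWalk_stop d m u L h]


theorem walk_nonneg (d : PySem.Dict Int Int) (m u L : Int)
    (h : ∀ y, 0 ≤ d.getD y 0) : ∀ y, 0 ≤ (bWalk d m u L).1.getD y 0 := by
  induction d, m, u, L using bWalk.induct with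
  | case1 d m u L hg ih =>
    rw [bWalk_step d m u L hg]
    simp only [dite_eq_ite] at ih
    refine ih ?_
    intro y
    rw [PySem.Dict.getD_insert]
    split
    · split <;> omega
    · exact h y
  | case2 d m u L hg =>
    rw [bWalk_stop d m u L hg]
    exact h


theorem walk_len_high (d1 : PySem.Dict Int Int) (m u L : Int) :
    ∀ (d2 : PySem.Dict Int Int), 2 ≤ u → (∀ y, u ≤ y → d1.getD y 0 = d2.getD y 0) →
    (bWalk d1 m u L).2 = (bWalk d2 m u L).2 := by
  induction d1, m, u, L using bWalk.induct with
  | case1 d1 m u L h ih =>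
    intro d2 h2 hd
    have hgu : d1.getD u 0 = d2.getD u 0 := hd u (le_refl u)
    rw [bWalk_step d1 m u L h, bWalk_step d2 m u L (by rw [← hgu]; exact h), ← hgu]
    simp only [dite_eq_ite] at ih ⊢
    have hsq := sq_facts u h2
    refine ih _ hsq.2 ?_
    intro y hy
    rw [PySem.Dict.getD_insert, PySem.Dict.getD_insert]
    split
    · rfl
    · exact hd y (by omega)
  | case2 d1 m u L h =>
    intro d2 h2 hd
    have hgu : d1.getD u 0 = d2.getD u 0 := hd u (le_refl u)
    rw [bWalk_stop d1 m u L h, bWalk_stop d2 m u L (by rw [← hgu]; exact h)]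


theorem dweight_pos (d : PySem.Dict Int Int) (u : Int) (h : 0 < d.getD u 0) :
    0 < dweight d := by
  have hcon : d.contains u = true := by
    by_contra hc
    rw [PySem.Dict.getD_of_not_contains d 0 (by simpa using hc)] at h
    omega
  have hmem : u ∈ d.keys.dedup :=
    List.mem_dedup.mpr ((PySem.Dict.contains_iff_mem_keys d u).mp hcon)
  have := List.le_sum_of_mem
    (List.mem_map.mpr ⟨u, hmem, rfl⟩ :
      (d.getD u 0).toNat ∈ d.keys.dedup.map (fun k => (d.getD k 0).toNat))
  unfold dweight
  omega

theorem walk_len_m : ∀ (N : Nat) (d : PySem.Dict Int Int) (m u L : Int), dweight d ≤ N →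
    2 ≤ u → 0 < m → (bWalk d m u L).2 = (bWalk d 1 u L).2 := by
  intro N
  induction N with
  | zero =>
    intro d m u L hN h2 hm
    have hg : ¬ 0 < d.getD u 0 := fun hg => by have := dweight_pos d u hg; omega
    rw [bWalk_stop d m u L (by tauto), bWalk_stop d 1 u L (by tauto)]
  | succ N ih =>
    intro d m u L hN h2 hm
    by_cases hg : 0 < d.getD u 0
    · have hsq := sq_facts u h2
      have h1m : ¬ (d.getD u 0 < 1) := by omega
      rw [bWalk_step d m u L ⟨hm, hg⟩, bWalk_step d 1 u L ⟨by omega, hg⟩]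
      simp only [if_neg h1m]
      set m' := (if d.getD u 0 < m then d.getD u 0 else m) with hm'
      have hm'pos : 0 < m' := by rw [hm']; split <;> omega
      have hm'le : m' ≤ d.getD u 0 := by rw [hm']; split <;> omega
      have hw : dweight (d.insert u (d.getD u 0 - m')) ≤ N := by
        have := dweight_dec d u (d.getD u 0 - m') (by omega) (by omega)
        omega
      rw [ih _ _ _ _ hw hsq.2 hm'pos]
      refine walk_len_high _ _ _ _ _ hsq.2 ?_
      intro y hy
      rw [PySem.Dict.getD_insert, PySem.Dict.getD_insert,
        if_neg (by omega), if_neg (by omega)]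
    · rw [bWalk_stop d m u L (by tauto), bWalk_stop d 1 u L (by tauto)]


theorem walk_len_mono1 : ∀ (N : Nat) (d1 d2 : PySem.Dict Int Int) (u L : Int), dweight d1 ≤ N →
    2 ≤ u → (∀ y, u ≤ y → d2.getD y 0 ≤ d1.getD y 0) →
    (bWalk d2 1 u L).2 ≤ (bWalk d1 1 u L).2 := by
  intro N
  induction N with
  | zero =>
    intro d1 d2 u L hN h2 hd
    have hg1 : ¬ 0 < d1.getD u 0 := fun hg => by have := dweight_pos d1 u hg; omega
    have hg2 : ¬ 0 < d2.getD u 0 := by have := hd u (le_refl u); omega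
    rw [bWalk_stop d1 1 u L (by tauto), bWalk_stop d2 1 u L (by tauto)]
  | succ N ih =>
    intro d1 d2 u L hN h2 hd
    by_cases hg1 : 0 < d1.getD u 0
    · by_cases hg2 : 0 < d2.getD u 0
      · have hsq := sq_facts u h2
        rw [bWalk_step d1 1 u L ⟨by omega, hg1⟩, bWalk_step d2 1 u L ⟨by omega, hg2⟩]
        rw [if_neg (by omega), if_neg (by omega)]
        refine ih _ _ _ _ ?_ hsq.2 ?_
        · have := dweight_dec d1 u (d1.getD u 0 - 1) (by omega) (by omega)
          omega
        · intro y hy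
          rw [PySem.Dict.getD_insert, PySem.Dict.getD_insert,
            if_neg (by omega), if_neg (by omega)]
          exact hd y (by omega)
      · rw [bWalk_stop d2 1 u L (by tauto)]
        exact walk_le_len d1 1 u L
    · have hg2 : ¬ 0 < d2.getD u 0 := by have := hd u (le_refl u); omega
      rw [bWalk_stop d1 1 u L (by tauto), bWalk_stop d2 1 u L (by tauto)]


theorem walk_insert_low : ∀ (N : Nat) (d : PySem.Dict Int Int) (m u L y₀ w : Int), dweight d ≤ N →
    2 ≤ u → y₀ < u →
    ∀ z, (bWalk (d.insert y₀ w) m u L).1.getD z 0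
      = if z = y₀ then w else (bWalk d m u L).1.getD z 0 := by
  intro N
  induction N with
  | zero =>
    intro d m u L y0 w hN h2 hy z
    have hg : ¬ 0 < d.getD u 0 := fun hg => by have := dweight_pos d u hg; omega
    have hg' : ¬ 0 < (d.insert y0 w).getD u 0 := by
      rw [PySem.Dict.getD_insert, if_neg (by omega)]; exact hg
    rw [bWalk_stop _ m u L (by tauto), bWalk_stop d m u L (by tauto),
      PySem.Dict.getD_insert]
  | succ N ih =>
    intro d m u L y0 w hN h2 hy z
    by_cases hg : 0 < m ∧ 0 < d.getD u 0
    · have hsq := sq_facts u h2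
      have hgu : (d.insert y0 w).getD u 0 = d.getD u 0 := by
        rw [PySem.Dict.getD_insert, if_neg (by omega)]
      rw [bWalk_step _ m u L (by rw [hgu]; exact hg), bWalk_step d m u L hg, hgu]
      have hcomm : DEq ((d.insert y0 w).insert u
            (d.getD u 0 - (if d.getD u 0 < m then d.getD u 0 else m)))
          ((d.insert u (d.getD u 0 - (if d.getD u 0 < m then d.getD u 0 else m))).insert y0 w) := by
        intro q
        exact PySem.Dict.getD_insert_insert_comm d _ _ (show y0 ≠ u by omega) q 0
      rw [(walk_congr _ _ _ _ _ hcomm).1 z]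
      refine (ih _ _ _ _ _ _ ?_ hsq.2 (by omega) z)
      have := dweight_dec d u (d.getD u 0 - (if d.getD u 0 < m then d.getD u 0 else m))
        (by split <;> omega) (by split <;> omega)
      omega
    · have hgu : (d.insert y0 w).getD u 0 = d.getD u 0 := by
        rw [PySem.Dict.getD_insert, if_neg (by omega)]
      rw [bWalk_stop _ m u L (by rw [hgu]; tauto), bWalk_stop d m u L (by tauto),
        PySem.Dict.getD_insert]


theorem walk_dweight_le (d : PySem.Dict Int Int) (m u L : Int) :
    dweight (bWalk d m u L).1 ≤ dweight d := by
  induction d, m, u, L using bWalk.induct with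
  | case1 d m u L h ih =>
    rw [bWalk_step d m u L h]
    simp only [dite_eq_ite] at ih
    refine le_trans ih (le_of_lt ?_)
    exact dweight_dec d u _ (by split <;> omega) (by split <;> omega)
  | case2 d m u L h =>
    rw [bWalk_stop d m u L h]

theorem walk_split : ∀ (N : Nat) (d : PySem.Dict Int Int) (u c L1 L2 L3 : Int), dweight d ≤ N →
    2 ≤ u → 0 < c →
    ∀ z, (bWalk d c u L1).1.getD z 0
      = (bWalk (bWalk d 1 u L2).1 (c-1) u L3).1.getD z 0 := by
  intro N
  induction N with
  | zero =>
    intro d u c L1 L2 L3 hN h2 hc z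
    have hg : ¬ 0 < d.getD u 0 := fun hg => by have := dweight_pos d u hg; omega
    rw [bWalk_stop d c u L1 (by tauto), bWalk_stop d 1 u L2 (by tauto),
      bWalk_stop d (c-1) u L3 (by tauto)]
  | succ N ih =>
    intro d u c L1 L2 L3 hN h2 hc z
    by_cases hg : 0 < d.getD u 0
    · have hsq := sq_facts u h2
      have hnd : dweight (d.insert u (d.getD u 0 - 1)) ≤ N := by
        have := dweight_dec d u (d.getD u 0 - 1) (by omega) (by omega)
        omega
      rw [bWalk_step d 1 u L2 ⟨by omega, hg⟩]
      simp only [if_neg (show ¬ d.getD u 0 < 1 by omega)]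
      by_cases hc1 : c = 1
      · subst hc1
        rw [bWalk_stop _ (1-1) u L3 (by norm_num)]
        rw [bWalk_step d 1 u L1 ⟨by omega, hg⟩]
        simp only [if_neg (show ¬ d.getD u 0 < 1 by omega)]
        rw [walk_dict_L _ _ _ (L1+1) (L2+1)]
      · have hc2 : 2 ≤ c := by omega
        have hWu : (bWalk (d.insert u (d.getD u 0 - 1)) 1 (u*u) (L2+1)).1.getD u 0
            = d.getD u 0 - 1 := by
          rw [walk_getD_low _ _ _ _ _ hsq.2 hsq.1, PySem.Dict.getD_insert, if_pos rfl]
        by_cases ht1 : d.getD u 0 = 1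
        · rw [bWalk_stop _ (c-1) u L3 (by rw [hWu, ht1]; simp)]
          rw [bWalk_step d c u L1 ⟨by omega, hg⟩]
          simp only [ht1, if_pos (show (1:Int) < c by omega)]
          rw [walk_dict_L _ _ _ (L1+1) (L2+1)]
        · have ht2 : 2 ≤ d.getD u 0 := by omega
          rw [bWalk_step _ (c-1) u L3 ⟨by omega, by rw [hWu]; omega⟩]
          rw [hWu]
          have hMcase : ((d.getD u 0 - 1 < c - 1) = (d.getD u 0 < c)) := by
            simp only [eq_iff_iff]; omega
          rw [bWalk_step d c u L1 ⟨by omega, hg⟩]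
          set M := (if d.getD u 0 < c then d.getD u 0 else c) with hMdef
          have hM2 : 2 ≤ M := by rw [hMdef]; split <;> omega
          have hMt : M ≤ d.getD u 0 := by rw [hMdef]; split <;> omega
          have hMout : (if d.getD u 0 - 1 < c - 1 then d.getD u 0 - 1 else c - 1) = M - 1 := by
            rw [hMdef]; split_ifs <;> omega
          have hval : d.getD u 0 - 1 - (if d.getD u 0 - 1 < c - 1 then d.getD u 0 - 1 else c - 1)
              = d.getD u 0 - M := by rw [hMout]; omega
          rw [hval, hMout]
          -- float the insert at u out of the outer walk on the right
          have hWw : dweight (bWalk (d.insert u (d.getD u 0 - 1)) 1 (u*u) (L2+1)).1 ≤ N :=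
            le_trans (walk_dweight_le _ _ _ _) hnd
          rw [walk_insert_low N _ _ _ _ u (d.getD u 0 - M) hWw hsq.2 hsq.1 z]
          -- collapse the two inserts at u on the left and float out as well
          have hcoll : d.insert u (d.getD u 0 - M)
              = (d.insert u (d.getD u 0 - 1)).insert u (d.getD u 0 - M) :=
            (PySem.Dict.insert_insert_self d u _ _).symm
          rw [hcoll, walk_insert_low N _ _ _ _ u (d.getD u 0 - M) hnd hsq.2 hsq.1 z]
          by_cases hz : z = u
          · simp only [if_pos hz]
          · simp only [if_neg hz]
            exact ih (d.insert u (d.getD u 0 - 1)) (u*u) M (L1+1) (L2+1) (L3+1)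
              hnd hsq.2 (by omega) z
    · rw [bWalk_stop d c u L1 (by tauto), bWalk_stop d 1 u L2 (by tauto),
        bWalk_stop d (c-1) u L3 (by tauto)]


theorem csChase_eq_bWalk (d : PySem.Dict Int Int) (u L : Int) :
    csChase d u L = bWalk d 1 u L := by
  induction d, u, L using csChase.induct with
  | case1 d u L h ih =>
    rw [csChase_step d u L h, bWalk_step d 1 u L ⟨by omega, h⟩]
    simp only [if_neg (show ¬ d.getD u 0 < 1 by omega)]
    exact ih
  | case2 d u L h =>
    rw [csChase_stop d u L h, bWalk_stop d 1 u L (by tauto)]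


theorem csChase_fix (u : Int) (hu : u*u = u) :
    ∀ (N : Nat) (d : PySem.Dict Int Int) (L : Int), (d.getD u 0).toNat ≤ N → 0 ≤ d.getD u 0 →
    (csChase d u L).2 = L + d.getD u 0 ∧
    (∀ y, (csChase d u L).1.getD y 0 = if y = u then 0 else d.getD y 0) := by
  intro N
  induction N with
  | zero =>
    intro d L hN h0
    have hz : d.getD u 0 = 0 := by omega
    rw [csChase_stop d u L (by omega)]
    refine ⟨by omega, ?_⟩
    intro y
    split
    · subst y; exact hz
    · rfl
  | succ N ih =>
    intro d L hN h0
    by_cases hg : 0 < d.getD u 0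
    · rw [csChase_step d u L hg, hu]
      have hiu : (d.insert u (d.getD u 0 - 1)).getD u 0 = d.getD u 0 - 1 := by
        rw [PySem.Dict.getD_insert, if_pos rfl]
      have IH := ih (d.insert u (d.getD u 0 - 1)) (L+1) (by rw [hiu]; omega) (by rw [hiu]; omega)
      refine ⟨by rw [IH.1, hiu]; omega, ?_⟩
      intro y
      rw [IH.2 y]
      split
      · rfl
      · rw [PySem.Dict.getD_insert]
        split
        · omega
        · rfl
    · have hz : d.getD u 0 = 0 := by omega
      rw [csChase_stop d u L (by omega)]
      refine ⟨by omega, ?_⟩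
      intro y
      split
      · subst y; exact hz
      · rfl


theorem csLoop_drain (v : Int) (hne : v*v ≠ v) :
    ∀ (N : Nat) (d : PySem.Dict Int Int) (B : Int), (d.getD v 0).toNat ≤ N →
    d.getD (v*v) 0 = 0 → 0 ≤ d.getD v 0 →
    (csLoop d v B).2 = (if 0 < d.getD v 0 then (if B < 1 then 1 else B) else B) ∧
    (∀ y, (csLoop d v B).1.getD y 0 = if y = v then 0 else d.getD y 0) := by
  intro N
  induction N with
  | zero =>
    intro d B hN h0 hj
    have hz : d.getD v 0 = 0 := by omega
    rw [csLoop_stop d v B (by omega)]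
    refine ⟨by rw [if_neg (by omega)], ?_⟩
    intro y
    split
    · subst y; exact hz
    · rfl
  | succ N ih =>
    intro d B hN h0 hj
    by_cases hg : 0 < d.getD v 0
    · rw [csLoop_step d v B hg]
      have hvv : (d.insert v (d.getD v 0 - 1)).getD (v*v) 0 = 0 := by
        rw [PySem.Dict.getD_insert, if_neg hne]; exact h0
      rw [csChase_stop _ _ _ (by omega)]
      have hiu : (d.insert v (d.getD v 0 - 1)).getD v 0 = d.getD v 0 - 1 := by
        rw [PySem.Dict.getD_insert, if_pos rfl]
      have IH := ih (d.insert v (d.getD v 0 - 1)) (if B < 1 then 1 else B)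
        (by rw [hiu]; omega) hvv (by rw [hiu]; omega)
      refine ⟨?_, ?_⟩
      · rw [IH.1, hiu, if_pos hg]
        split_ifs <;> omega
      · intro y
        rw [IH.2 y]
        split
        · rfl
        · rw [PySem.Dict.getD_insert]
          split
          · omega
          · rfl
    · have hz : d.getD v 0 = 0 := by omega
      rw [csLoop_stop d v B (by omega)]
      refine ⟨by rw [if_neg (by omega)], ?_⟩
      intro y
      split
      · subst y; exact hz
      · rfl


theorem csLoop_congr : ∀ (N : Nat) (d1 d2 : PySem.Dict Int Int) (v b : Int), dweight d1 ≤ N →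
    DEq d1 d2 →
    (csLoop d1 v b).2 = (csLoop d2 v b).2 ∧ DEq (csLoop d1 v b).1 (csLoop d2 v b).1 := by
  intro N
  induction N with
  | zero =>
    intro d1 d2 v b hN hde
    have hg1 : ¬ 0 < d1.getD v 0 := fun hg => by have := dweight_pos d1 v hg; omega
    have hg2 : ¬ 0 < d2.getD v 0 := by rw [← hde v]; exact hg1
    rw [csLoop_stop d1 v b (by tauto), csLoop_stop d2 v b (by tauto)]
    exact ⟨rfl, hde⟩
  | succ N ih =>
    intro d1 d2 v b hN hde
    by_cases hg1 : 0 < d1.getD v 0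
    · have hg2 : 0 < d2.getD v 0 := by rw [← hde v]; exact hg1
      rw [csLoop_step d1 v b hg1, csLoop_step d2 v b hg2]
      have hde1 : DEq (d1.insert v (d1.getD v 0 - 1)) (d2.insert v (d2.getD v 0 - 1)) := by
        intro y
        rw [PySem.Dict.getD_insert, PySem.Dict.getD_insert, hde v]
        split
        · rfl
        · exact hde y
      have hch := walk_congr (d1.insert v (d1.getD v 0 - 1)) 1 (v*v) 1 _ hde1
      rw [csChase_eq_bWalk, csChase_eq_bWalk] at *
      rw [hch.2]
      refine ih _ _ v _ ?_ hch.1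
      have h1 : dweight (bWalk (d1.insert v (d1.getD v 0 - 1)) 1 (v*v) 1).1
          ≤ dweight (d1.insert v (d1.getD v 0 - 1)) := walk_dweight_le _ _ _ _
      have h2 := dweight_dec d1 v (d1.getD v 0 - 1) (by omega) (by omega)
      omega
    · have hg2 : ¬ 0 < d2.getD v 0 := by rw [← hde v]; exact hg1
      rw [csLoop_stop d1 v b (by tauto), csLoop_stop d2 v b (by tauto)]
      exact ⟨rfl, hde⟩


theorem csLoop_main (v : Int) (hv0 : v ≠ 0) (hv1 : v ≠ 1) (hvm : v ≠ -1) :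
    ∀ (n : Nat) (d : PySem.Dict Int Int) (b : Int),
    (∀ y, 0 ≤ d.getD y 0) → (d.getD v 0).toNat = n → 0 < d.getD v 0 →
    (csLoop d v b).2
      = (if b < (bWalk (d.insert v 0) (d.getD v 0) (v*v) 1).2
         then (bWalk (d.insert v 0) (d.getD v 0) (v*v) 1).2 else b) ∧
    (∀ y, (csLoop d v b).1.getD y 0
      = (bWalk (d.insert v 0) (d.getD v 0) (v*v) 1).1.getD y 0) := by
  have hcase : v ≤ -2 ∨ 2 ≤ v := by omega
  have h2 : 2 ≤ v*v := by rcases hcase with h | h <;> nlinarith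
  have hlt : v < v*v := by rcases hcase with h | h <;> nlinarith
  intro n
  induction n with
  | zero =>
    intro d b hnn hcn hc
    omega
  | succ n ih =>
    intro d b hnn hcn hc
    rw [csLoop_step d v b hc, csChase_eq_bWalk]
    have hnn1 : ∀ y, 0 ≤ (d.insert v (d.getD v 0 - 1)).getD y 0 := by
      intro y
      rw [PySem.Dict.getD_insert]
      split
      · omega
      · exact hnn y
    have hr1u : (bWalk (d.insert v (d.getD v 0 - 1)) 1 (v*v) 1).1.getD v 0
        = d.getD v 0 - 1 := by
      rw [walk_getD_low _ _ _ _ _ h2 hlt, PySem.Dict.getD_insert, if_pos rfl]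
    by_cases hcone : d.getD v 0 = 1
    · rw [csLoop_stop _ _ _ (by rw [hr1u]; omega)]
      have hm : d.insert v 0 = d.insert v (d.getD v 0 - 1) := by rw [hcone]; norm_num
      rw [hm, hcone]
      exact ⟨rfl, fun y => rfl⟩
    · have hc2 : 2 ≤ d.getD v 0 := by omega
      have hnnr : ∀ y, 0 ≤ (bWalk (d.insert v (d.getD v 0 - 1)) 1 (v*v) 1).1.getD y 0 :=
        walk_nonneg _ _ _ _ hnn1
      have IH := ih (bWalk (d.insert v (d.getD v 0 - 1)) 1 (v*v) 1).1
        (if b < (bWalk (d.insert v (d.getD v 0 - 1)) 1 (v*v) 1).2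
         then (bWalk (d.insert v (d.getD v 0 - 1)) 1 (v*v) 1).2 else b)
        hnnr (by rw [hr1u]; omega) (by rw [hr1u]; omega)
      rw [hr1u] at IH
      -- name the pieces
      have hsplit : ∀ z, (bWalk (d.insert v (d.getD v 0 - 1)) (d.getD v 0) (v*v) 1).1.getD z 0
          = (bWalk (bWalk (d.insert v (d.getD v 0 - 1)) 1 (v*v) 1).1 (d.getD v 0 - 1) (v*v) 1).1.getD z 0 :=
        walk_split (dweight (d.insert v (d.getD v 0 - 1))) _ _ _ 1 1 1 (le_refl _) h2 (by omega)
      -- dict part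
      have hdict : ∀ y, (bWalk ((bWalk (d.insert v (d.getD v 0 - 1)) 1 (v*v) 1).1.insert v 0)
            (d.getD v 0 - 1) (v*v) 1).1.getD y 0
          = (bWalk (d.insert v 0) (d.getD v 0) (v*v) 1).1.getD y 0 := by
        intro y
        rw [walk_insert_low (dweight (bWalk (d.insert v (d.getD v 0 - 1)) 1 (v*v) 1).1)
          _ _ _ _ v 0 (le_refl _) h2 hlt y]
        rw [walk_insert_low (dweight d) _ _ _ _ v 0 (le_refl _) h2 hlt y]
        rw [← hsplit y]
        rw [show d.insert v (d.getD v 0 - 1) = d.insert v (d.getD v 0 - 1) from rfl] at *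
        rw [walk_insert_low (dweight d) _ _ _ _ v (d.getD v 0 - 1) (le_refl _) h2 hlt y]
        by_cases hy : y = v
        · simp only [if_pos hy]
        · simp only [if_neg hy]
      -- length part
      have hlenW : (bWalk (d.insert v 0) (d.getD v 0) (v*v) 1).2
          = (bWalk (d.insert v (d.getD v 0 - 1)) 1 (v*v) 1).2 := by
        rw [walk_len_m (dweight (d.insert v 0)) _ _ _ _ (le_refl _) h2 (by omega)]
        refine walk_len_high _ _ _ _ _ h2 ?_
        intro y hy
        rw [PySem.Dict.getD_insert, PySem.Dict.getD_insert,
          if_neg (by omega), if_neg (by omega)]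
      have hlenW' : (bWalk ((bWalk (d.insert v (d.getD v 0 - 1)) 1 (v*v) 1).1.insert v 0)
            (d.getD v 0 - 1) (v*v) 1).2
          ≤ (bWalk (d.insert v (d.getD v 0 - 1)) 1 (v*v) 1).2 := by
        rw [walk_len_m (dweight ((bWalk (d.insert v (d.getD v 0 - 1)) 1 (v*v) 1).1.insert v 0))
          _ _ _ _ (le_refl _) h2 (by omega)]
        rw [walk_len_high _ _ _ _ (bWalk (d.insert v (d.getD v 0 - 1)) 1 (v*v) 1).1 h2
          (by
            intro y hy
            rw [PySem.Dict.getD_insert, if_neg (by omega)])]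
        refine walk_len_mono1 (dweight (d.insert v (d.getD v 0 - 1))) _ _ _ _ (le_refl _) h2 ?_
        intro y hy
        exact walk_getD_le _ _ _ _ y
      refine ⟨?_, ?_⟩
      · rw [IH.1, ← hlenW] at *
        generalize hA : (bWalk (d.insert v 0) (d.getD v 0) (v*v) 1).2 = A at *
        generalize hB : (bWalk ((bWalk (d.insert v (d.getD v 0 - 1)) 1 (v*v) 1).1.insert v 0)
            (d.getD v 0 - 1) (v*v) 1).2 = B at *
        split_ifs <;> omega
      · intro y
        rw [IH.2 y, hdict y]


theorem step_nonneg (d : PySem.Dict Int Int) (v b : Int)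
    (h : ∀ y, 0 ≤ d.getD y 0) : ∀ y, 0 ≤ (bagStep d v b).1.getD y 0 := by
  intro y
  unfold bagStep
  by_cases hc : d.getD v 0 = 0
  · simp only [if_pos hc]
    exact h y
  · simp only [if_neg hc]
    by_cases h01 : v = 0 ∨ v = 1
    · simp only [if_pos h01]
      rw [PySem.Dict.getD_insert]
      split
      · omega
      · exact h y
    · simp only [if_neg h01]
      by_cases hm1 : v = -1
      · rw [if_pos hm1, PySem.Dict.getD_insert]
        split
        · omega
        · rw [PySem.Dict.getD_insert]
          split
          · omega
          · exact h y
      · simp only [if_neg hm1]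
        refine walk_nonneg _ _ _ _ ?_ y
        intro q
        rw [PySem.Dict.getD_insert]
        split
        · omega
        · exact h q

theorem step_sim (d : PySem.Dict Int Int) (v b : Int) (h : ∀ y, 0 ≤ d.getD y 0) :
    (csLoop d v b).2 = (bagStep d v b).2 ∧ DEq (csLoop d v b).1 (bagStep d v b).1 := by
  unfold bagStep
  by_cases hc : d.getD v 0 = 0
  · simp only [if_pos hc]
    rw [csLoop_stop d v b (by omega)]
    exact ⟨rfl, fun y => rfl⟩
  · simp only [if_neg hc]
    have hcpos : 0 < d.getD v 0 := by have := h v; omega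
    by_cases h01 : v = 0 ∨ v = 1
    · simp only [if_pos h01]
      have hvv : v * v = v := by rcases h01 with rfl | rfl <;> norm_num
      rw [csLoop_step d v b hcpos]
      have hgi : (d.insert v (d.getD v 0 - 1)).getD (v*v) 0 = d.getD v 0 - 1 := by
        rw [hvv, PySem.Dict.getD_insert, if_pos rfl]
      have hfix := csChase_fix (v*v) (by rw [hvv, hvv])
        ((d.insert v (d.getD v 0 - 1)).getD (v*v) 0).toNat
        (d.insert v (d.getD v 0 - 1)) 1 (le_refl _) (by rw [hgi]; omega)
      have hlen : (csChase (d.insert v (d.getD v 0 - 1)) (v*v) 1).2 = d.getD v 0 := by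
        rw [hfix.1, hgi]; omega
      have hstop : (csChase (d.insert v (d.getD v 0 - 1)) (v*v) 1).1.getD v 0 = 0 := by
        rw [hfix.2 v, if_pos hvv.symm]
      rw [csLoop_stop _ _ _ (by rw [hstop]; omega), hlen]
      refine ⟨rfl, ?_⟩
      intro y
      rw [hfix.2 y, hvv]
      by_cases hy : y = v
      · rw [if_pos hy, PySem.Dict.getD_insert, if_pos hy]
      · rw [if_neg hy, PySem.Dict.getD_insert, if_neg hy, PySem.Dict.getD_insert, if_neg hy]
    · simp only [if_neg h01]
      by_cases hm1 : v = -1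
      · rw [if_pos hm1]
        rw [csLoop_step d v b hcpos]
        have hvv : v * v = 1 := by rw [hm1]; norm_num
        rw [hvv]
        have h1v : (1 : Int) ≠ v := by rw [hm1]; norm_num
        have hvne : ¬ (v = 1) := fun hh => h1v hh.symm
        have hk : (d.insert v (d.getD v 0 - 1)).getD 1 0 = d.getD 1 0 := by
          rw [PySem.Dict.getD_insert, if_neg h1v]
        have hfix := csChase_fix 1 (by norm_num)
          ((d.insert v (d.getD v 0 - 1)).getD 1 0).toNat
          (d.insert v (d.getD v 0 - 1)) 1 (le_refl _) (by rw [hk]; exact h 1)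
        have hlen : (csChase (d.insert v (d.getD v 0 - 1)) 1 1).2 = 1 + d.getD 1 0 := by
          rw [hfix.1, hk]
        have hCm : (csChase (d.insert v (d.getD v 0 - 1)) 1 1).1.getD v 0
            = d.getD v 0 - 1 := by
          rw [hfix.2 v, if_neg hvne, PySem.Dict.getD_insert, if_pos rfl]
        have hdr := csLoop_drain v (by rw [hvv, hm1]; norm_num)
          ((csChase (d.insert v (d.getD v 0 - 1)) 1 1).1.getD v 0).toNat
          (csChase (d.insert v (d.getD v 0 - 1)) 1 1).1
          (if b < (csChase (d.insert v (d.getD v 0 - 1)) 1 1).2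
           then (csChase (d.insert v (d.getD v 0 - 1)) 1 1).2 else b)
          (le_refl _)
          (by rw [hvv, hfix.2 1, if_pos rfl])
          (by rw [hCm]; omega)
        have hcand : (d.insert v 0).getD 1 0 = d.getD 1 0 := by
          rw [PySem.Dict.getD_insert, if_neg h1v]
        refine ⟨?_, ?_⟩
        · rw [hdr.1, hCm, hlen, hcand]
          have hknn := h 1
          split_ifs <;> omega
        · intro y
          rw [hdr.2 y]
          by_cases hy1 : y = 1
          · subst hy1
            rw [if_neg h1v, hfix.2 1, if_pos rfl,
              PySem.Dict.getD_insert, if_pos rfl]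
          · by_cases hyv : y = v
            · rw [if_pos hyv, PySem.Dict.getD_insert, if_neg hy1,
                PySem.Dict.getD_insert, if_pos hyv]
            · rw [if_neg hyv, hfix.2 y, if_neg hy1, PySem.Dict.getD_insert, if_neg hyv,
                PySem.Dict.getD_insert, if_neg hy1, PySem.Dict.getD_insert, if_neg hyv]
      · simp only [if_neg hm1]
        push_neg at h01
        have hmain := csLoop_main v h01.1 h01.2 hm1 (d.getD v 0).toNat d b h rfl hcpos
        exact ⟨hmain.1, hmain.2⟩

theorem fold_sim : ∀ (ks : List Int) (d1 d2 : PySem.Dict Int Int) (b : Int),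
    DEq d1 d2 → (∀ y, 0 ≤ d2.getD y 0) →
    (ks.foldl (fun s v => csLoop s.1 v s.2) (d1, b)).2
      = (ks.foldl (fun s v => bagStep s.1 v s.2) (d2, b)).2 := by
  intro ks
  induction ks with
  | nil =>
    intro d1 d2 b _ _
    rfl
  | cons v ks ih =>
    intro d1 d2 b hde hnn
    simp only [List.foldl_cons]
    have hcg := csLoop_congr (dweight d1) d1 d2 v b (le_refl _) hde
    have hss := step_sim d2 v b hnn
    have hb2 : (csLoop d1 v b).2 = (bagStep d2 v b).2 := by rw [hcg.1, hss.1]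
    have hdd : DEq (csLoop d1 v b).1 (bagStep d2 v b).1 := fun y => by
      rw [hcg.2 y, hss.2 y]
    have h1 : (csLoop d1 v b) = ((csLoop d1 v b).1, (csLoop d1 v b).2) := rfl
    have h2 : (bagStep d2 v b) = ((bagStep d2 v b).1, (bagStep d2 v b).2) := rfl
    rw [h1, h2, hb2]
    exact ih _ _ _ hdd (step_nonneg d2 v b hnn)


theorem equal_stub : ∀ (rice_bags : List Int), max_set_size rice_bags = max_set_size_alt rice_bags := by
  intro l
  unfold max_set_size max_set_size_alt
  rw [PySem.Dict.foldl_insert_getD_add_one_eq_counter l]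
  rw [max_getD_eq_foldl _ (by
    intro a ha
    rcases List.mem_map.mp ha with ⟨c, _, rfl⟩
    positivity)]
  rw [outer_sim ((PySem.List.sorted l (fun y => y) false).length
      + (PySem.List.sorted (PySem.Dict.counter l).keys (fun y => y) false).length)
    (PySem.List.sorted l (fun y => y) false)
    (PySem.List.sorted (PySem.Dict.counter l).keys (fun y => y) false)
    (PySem.Dict.counter l) 0 (le_refl _)
    (by simpa using PySem.List.sorted_pairwise l (fun y => y))
    (by
      intro y
      rw [PySem.Dict.getD_counter]
      rw [(PySem.List.sorted_perm l (fun y => y) false).count_eq y])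
    (by
      have hnd : (PySem.List.sorted (PySem.Dict.counter l).keys (fun y => y) false).Nodup := by
        rw [(PySem.List.sorted_perm (PySem.Dict.counter l).keys (fun y => y) false).nodup_iff]
        rw [PySem.Dict.keys_counter]
        exact PySem.Set.nodup_ofList l
      have hle : (PySem.List.sorted (PySem.Dict.counter l).keys (fun y => y) false).Pairwise (· ≤ ·) := by
        simpa using PySem.List.sorted_pairwise (PySem.Dict.counter l).keys (fun y => y)
      exact (hle.and hnd).imp (fun h => lt_of_le_of_ne h.1 h.2))
    (by
      intro y hy
      rw [PySem.Dict.getD_counter] at hy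
      rw [PySem.List.mem_sorted, PySem.Dict.keys_counter, PySem.Set.mem_ofList]
      apply List.count_pos_iff.mp
      omega)]
  exact fold_sim _ _ _ _ (fun y => rfl)
    (by intro y; rw [PySem.Dict.getD_counter]; positivity)

-- ===== VERDICT (by name: the statement is the Claim_ definition above) =====
theorem max_set_size_spec : Claim_equal_max_set_size := by
  intro l _ _
  unfold Spec_max_set_size
  exact equal_stub l
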